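-- pv_equiv track=rewrite | github.com/thisisignitedoreo/tcbpp | console.py | convert
-- ===== SOURCE A (Python) =====
-- def convert(array, start=0):
--     old = array[0]
--     res = [[start, old]]
--     for k, i in enumerate(array):
--         if i != old:
--             res.append([k + start, i])
--         old = i
--     return res
-- ===== SOURCE B (Python) =====
-- def convert(array, start=0):
--     res = []
--     i = 0
--     n = len(array)
--     while i < n:
--         v = array[i]
--         j = i + 1
--         while j < n and array[j] == v:
--             j += 1
--         res.append([i + start, v])
--         i = j
--     return res
-- ===== Notes on version B (the rewrite author's own statement) =====
-- stated objective: alternative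
-- what changed: Replaced the per-element loop with a tracked previous value by run-splitting: an outer loop emits one pair per maximal run of equal values and an inner scan advances the index past the whole run (no previous-value accumulator, no per-element append test).
-- crash fix: On an empty array A raises IndexError (array[0]); B returns []. — e.g. on convert([], 0): A raises IndexError, B returns []
import Mathlib
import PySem

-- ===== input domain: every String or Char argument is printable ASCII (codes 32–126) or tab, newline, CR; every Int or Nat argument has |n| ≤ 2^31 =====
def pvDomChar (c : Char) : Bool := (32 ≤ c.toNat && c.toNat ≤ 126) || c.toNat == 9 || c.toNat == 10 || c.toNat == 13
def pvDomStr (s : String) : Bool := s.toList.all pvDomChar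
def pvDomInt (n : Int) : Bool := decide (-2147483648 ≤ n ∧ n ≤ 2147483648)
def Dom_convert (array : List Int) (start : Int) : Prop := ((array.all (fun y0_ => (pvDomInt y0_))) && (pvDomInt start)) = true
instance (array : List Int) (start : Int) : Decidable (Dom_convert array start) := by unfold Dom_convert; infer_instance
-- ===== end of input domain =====

-- B replaces A's per-element previous-value loop by run-splitting (one pair per maximal run, inner scan skips the run); same values where A returns, B returns [] where A raises on empty input.


-- ===== PORT A =====
def convert (array : List Int) (start : Int) : List (List Int) :=
  match PySem.List.pyGet? array 0 with
  | none => []   -- array[0] raises IndexError in Python; excluded by Pre_convert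
  | some a0 =>
    ((PySem.List.enumerate array 0).foldl
      (fun (st : List (List Int) × Int) (ki : Int × Int) =>
        (if ki.2 ≠ st.2 then st.1 ++ [[ki.1 + start, ki.2]] else st.1, ki.2))
      ([[start, a0]], a0)).1

-- ===== PORT B =====
-- inner while: number of leading elements of the rest equal to the run's value
def leadRun (v : Int) : List Int → Nat
  | [] => 0
  | x :: xs => if x = v then 1 + leadRun v xs else 0

-- outer while: emit one pair per maximal run, advance past the run
-- (fuel makes the recursion structural; array.length fuel is always enough since each step consumes ≥ 1 element)
def goB (start : Int) : Nat → List Int → Int → List (List Int)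
  | 0, _, _ => []
  | _ + 1, [], _ => []
  | f + 1, v :: rest, i =>
      let r := leadRun v rest
      [i + start, v] :: goB start f (rest.drop r) (i + 1 + (r : Int))

def convert_alt (array : List Int) (start : Int) : List (List Int) :=
  goB start array.length array 0

-- ===== PRECONDITION & SPEC =====
-- Pre_ excludes only the empty array, on which A raises IndexError.
def Pre_convert (array : List Int) (start : Int) : Prop := array ≠ []
instance (array : List Int) (start : Int) : Decidable (Pre_convert array start) := by unfold Pre_convert; infer_instance
def pvWitness_convert : List Int × Int := ([1, 1, 2], 0)
-- On an empty array A raises IndexError (array[0]); B returns [].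
def Raises_convert (array : List Int) (start : Int) : Prop := array = []
instance (array : List Int) (start : Int) : Decidable (Raises_convert array start) := by unfold Raises_convert; infer_instance
def pvRaiseWitness_convert : List Int × Int := ([], 0)
def pvRaiseWitnessOut_convert : List (List Int) := []
def Spec_convert (array : List Int) (start : Int) (out : List (List Int)) : Prop := out = convert_alt array start
instance (array : List Int) (start : Int) (out : List (List Int)) : Decidable (Spec_convert array start out) := by unfold Spec_convert; infer_instance

-- ===== CLAIM (what is proved, stated in full; the proofs are below) =====
def Claim_equal_convert : Prop := ∀ (array : List Int) (start : Int), Dom_convert array start → Pre_convert array start → Spec_convert array start (convert array start)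
def Claim_raises_convert : Prop := (∀ (array : List Int) (start : Int), Dom_convert array start → Raises_convert array start → ¬ Pre_convert array start) ∧ (Dom_convert (pvRaiseWitness_convert.1) (pvRaiseWitness_convert.2) ∧ Raises_convert (pvRaiseWitness_convert.1) (pvRaiseWitness_convert.2) ∧ convert_alt (pvRaiseWitness_convert.1) (pvRaiseWitness_convert.2) = pvRaiseWitnessOut_convert)

-- ===== LEMMAS AND PROOFS =====

/-- Change points of `ys`, starting at index `n` with previous value `prev`:
    common description of both loops. -/
def chg (start : Int) : List Int → Int → Int → List (List Int)
  | [], _, _ => []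
  | y :: ys, n, prev => (if y = prev then [] else [[n + start, y]]) ++ chg start ys (n + 1) y

theorem convert_foldl (start : Int) (ys : List Int) (n : Int) (prev : Int)
    (acc : List (List Int)) :
    ((PySem.List.enumerate ys n).foldl
      (fun (st : List (List Int) × Int) (ki : Int × Int) =>
        (if ki.2 ≠ st.2 then st.1 ++ [[ki.1 + start, ki.2]] else st.1, ki.2))
      (acc, prev)).1 = acc ++ chg start ys n prev := by
  induction ys generalizing n prev acc with
  | nil => simp [PySem.List.enumerate_nil, chg]
  | cons y ys ih =>
    rw [PySem.List.enumerate_cons, List.foldl_cons]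
    by_cases h : y = prev
    · rw [if_neg (not_not_intro h), ih]
      simp [chg, h]
    · rw [if_pos h, ih]
      simp [chg, h, List.append_assoc]

theorem chg_eq_goB (start : Int) (ys : List Int) :
    ∀ (f : Nat) (i v : Int), ys.length ≤ f →
      chg start ys i v
        = goB start f (ys.drop (leadRun v ys)) (i + (leadRun v ys : Int)) := by
  induction ys with
  | nil => intro f i v _; cases f <;> simp [chg, goB]
  | cons y ys ih =>
    intro f i v hf
    by_cases h : y = v
    · have h1 : chg start (y :: ys) i v = chg start ys (i + 1) v := by
        simp [chg, h]
      have h2 : leadRun v (y :: ys) = 1 + leadRun v ys := by simp [leadRun, h]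
      rw [h1, ih f (i + 1) v (by simpa using Nat.le_of_succ_le hf), h2]
      have : (y :: ys).drop (1 + leadRun v ys) = ys.drop (leadRun v ys) := by
        simp [List.drop_succ_cons, Nat.add_comm]
      rw [this]
      congr 1
      push_cast
      ring
    · have hlr : leadRun v (y :: ys) = 0 := by simp [leadRun, h]
      rw [hlr]
      simp only [List.drop_zero, Nat.cast_zero, add_zero]
      obtain ⟨f', rfl⟩ : ∃ f', f = f' + 1 := by
        cases f with
        | zero => simp at hf
        | succ f' => exact ⟨f', rfl⟩
      rw [goB]
      simp only [chg, if_neg h, List.singleton_append]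
      congr 1
      rw [ih f' (i + 1) y (by simpa using Nat.succ_le_succ_iff.mp hf)]

-- ===== VERDICT (by name: the statement is the Claim_ definition above) =====
theorem convert_spec : Claim_equal_convert := by
  intro array start _ hpre
  unfold Spec_convert
  cases array with
  | nil => exact absurd rfl hpre
  | cons a0 ys =>
    have hA : convert (a0 :: ys) start = [[start, a0]] ++ chg start (a0 :: ys) 0 a0 := by
      unfold convert
      rw [PySem.List.pyGet?_zero_cons]
      exact convert_foldl start (a0 :: ys) 0 a0 [[start, a0]]
    have hchg : chg start (a0 :: ys) 0 a0 = chg start ys 1 a0 := by simp [chg]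
    rw [hA, hchg, chg_eq_goB start ys ys.length 1 a0 le_rfl]
    unfold convert_alt
    simp only [List.length_cons]
    rw [goB]
    simp only [zero_add, List.singleton_append]

theorem convert_raises : Claim_raises_convert := by
  unfold Claim_raises_convert
  exact ⟨fun array start _ h hp => hp h, by decide⟩

theorem convert_raises_witness_ok :
    convert_alt (pvRaiseWitness_convert.1) (pvRaiseWitness_convert.2) = pvRaiseWitnessOut_convert :=
  convert_raises.2.2.2
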